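-- pv_equiv track=rewrite | github.com/D0n9-KG/LogicKG | backend/app/extraction/orchestrator.py | _collapse_ws_with_map
-- ===== SOURCE A (Python) =====
-- def _collapse_ws_with_map(text: str) -> tuple[str, list[int]]:
--     """Collapse consecutive whitespace to single spaces and keep source index map.
--
--     Returns (collapsed_text, source_index_map) where source_index_map[i] is the
--     index in the original text corresponding to collapsed_text[i].
--     """
--     out_chars: list[str] = []
--     out_to_src: list[int] = []
--     pending_space = False
--     for src_idx, ch in enumerate(text or ""):
--         if ch.isspace():
--             if out_chars:  # Don't add leading space
--                 pending_space = True
--             continue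
--         if pending_space:
--             out_chars.append(" ")
--             out_to_src.append(src_idx)
--             pending_space = False
--         out_chars.append(ch)
--         out_to_src.append(src_idx)
--     return ("".join(out_chars), out_to_src)
-- ===== SOURCE B (Python) =====
-- def _collapse_ws_with_map(text: str) -> tuple[str, list[int]]:
--     """Collapse runs of whitespace to single spaces; run-based scan instead of a
--     per-character flag loop."""
--     t = text or ""
--     n = len(t)
--     out_chars: list[str] = []
--     out_to_src: list[int] = []
--     i = 0
--     first = True
--     while i < n:
--         if t[i].isspace():
--             i += 1
--             continue
--         start = i
--         while i < n and not t[i].isspace():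
--             i += 1
--         if not first:
--             out_chars.append(" ")
--             out_to_src.append(start)
--         out_chars.extend(t[start:i])
--         out_to_src.extend(range(start, i))
--         first = False
--     return ("".join(out_chars), out_to_src)
-- ===== Notes on version B (the rewrite author's own statement) =====
-- stated objective: alternative
-- what changed: Replaces A's per-character loop with a pending_space flag by a two-level scan that locates each maximal non-whitespace run and emits it (with a single mapped space before every run but the first) as a block via slice/range extends.
import Mathlib
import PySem

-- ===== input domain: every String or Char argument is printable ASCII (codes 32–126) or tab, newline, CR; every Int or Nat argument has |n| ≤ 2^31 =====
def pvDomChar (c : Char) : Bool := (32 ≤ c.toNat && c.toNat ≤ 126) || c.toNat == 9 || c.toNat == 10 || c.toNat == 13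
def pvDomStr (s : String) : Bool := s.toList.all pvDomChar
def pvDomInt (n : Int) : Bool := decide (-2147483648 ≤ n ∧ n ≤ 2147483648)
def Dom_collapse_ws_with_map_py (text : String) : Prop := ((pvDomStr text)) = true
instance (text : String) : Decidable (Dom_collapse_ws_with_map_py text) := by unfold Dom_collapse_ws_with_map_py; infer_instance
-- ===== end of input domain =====

-- B differs from A by scanning maximal non-whitespace runs instead of a per-char pending_space flag; equal return values proved.

-- ===== PORT A =====
-- A's for-loop over enumerate(text) with state (out_chars, out_to_src, pending_space).
def pvGoA : List Char → Int → List Char → List Int → Bool → List Char × List Int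
  | [], _, out, mp, _ => (out, mp)
  | c :: rest, i, out, mp, pending =>
    if PySem.Chars.isspace c then
      pvGoA rest (i + 1) out mp (if out.isEmpty then pending else true)
    else if pending then
      pvGoA rest (i + 1) (out ++ [' ', c]) (mp ++ [i, i]) false
    else
      pvGoA rest (i + 1) (out ++ [c]) (mp ++ [i]) false

def collapse_ws_with_map_py (text : String) : String × List Int :=
  let r := pvGoA text.toList 0 [] [] false
  (String.ofList r.1, r.2)

-- ===== PORT B =====
-- inner `while i < n and not t[i].isspace()` scan: split off the maximal non-whitespace run
def pvSpanRun : List Char → List Char × List Char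
  | [] => ([], [])
  | c :: rest =>
    if PySem.Chars.isspace c then ([], c :: rest)
    else
      let p := pvSpanRun rest
      (c :: p.1, p.2)

-- range(start, i) for the run's source indices
def pvIdxs (i : Int) : Nat → List Int
  | 0 => []
  | n + 1 => i :: pvIdxs (i + 1) n

theorem pvSpanRun_snd_length_le : ∀ cs : List Char, (pvSpanRun cs).2.length ≤ cs.length := by
  intro cs
  induction cs with
  | nil => simp [pvSpanRun]
  | cons c rest ih =>
    simp only [pvSpanRun]
    split
    · simp
    · simpa using Nat.le_succ_of_le ih

-- outer while-loop over the remaining text, `first` = no run emitted yet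
def pvGoB : List Char → Int → Bool → List Char × List Int
  | [], _, _ => ([], [])
  | c :: rest, i, first =>
    if PySem.Chars.isspace c then
      pvGoB rest (i + 1) first
    else
      let run : List Char := c :: (pvSpanRun rest).1
      let tail := pvGoB (pvSpanRun rest).2 (i + run.length) false
      if first then (run ++ tail.1, pvIdxs i run.length ++ tail.2)
      else (' ' :: (run ++ tail.1), i :: (pvIdxs i run.length ++ tail.2))
  termination_by cs => cs.length
  decreasing_by
    · simp
    · exact Nat.lt_succ_of_le (pvSpanRun_snd_length_le rest)

def collapse_ws_with_map_py_alt (text : String) : String × List Int :=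
  let r := pvGoB text.toList 0 true
  (String.ofList r.1, r.2)

-- ===== PRECONDITION & SPEC =====
def Spec_collapse_ws_with_map_py (text : String) (out : String × List Int) : Prop := out = collapse_ws_with_map_py_alt text
instance (text : String) (out : String × List Int) : Decidable (Spec_collapse_ws_with_map_py text out) := by unfold Spec_collapse_ws_with_map_py; infer_instance

-- ===== CLAIM (what is proved, stated in full; the proofs are below) =====
def Claim_equal_collapse_ws_with_map_py : Prop := ∀ (text : String), Dom_collapse_ws_with_map_py text → Spec_collapse_ws_with_map_py text (collapse_ws_with_map_py text)

-- ===== LEMMAS AND PROOFS =====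

-- Reference emitter: sep = a space is due before the next kept char, started = some char was kept already.
def pvE : List Char → Int → Bool → Bool → List Char × List Int
  | [], _, _, _ => ([], [])
  | c :: rest, i, sep, started =>
    if PySem.Chars.isspace c then
      pvE rest (i + 1) (sep || started) started
    else
      let t := pvE rest (i + 1) false true
      if sep then (' ' :: c :: t.1, i :: i :: t.2)
      else (c :: t.1, i :: t.2)

theorem pvGoA_eq_pvE : ∀ (cs : List Char) (i : Int) (out : List Char) (mp : List Int) (pending : Bool),
    pvGoA cs i out mp pending =
      (out ++ (pvE cs i pending (!out.isEmpty)).1, mp ++ (pvE cs i pending (!out.isEmpty)).2) := by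
  intro cs
  induction cs with
  | nil => intro i out mp pending; simp [pvGoA, pvE]
  | cons c rest ih =>
    intro i out mp pending
    simp only [pvGoA, pvE]
    by_cases hws : PySem.Chars.isspace c
    · simp only [hws, if_true]
      rw [ih]
      have h1 : (if out.isEmpty then pending else true) = (pending || !out.isEmpty) := by
        cases out <;> simp
      rw [h1]
    · simp only [hws, if_false, Bool.false_eq_true]
      by_cases hp : pending
      · subst hp
        simp only [if_true]
        rw [ih]
        have h2 : (!(out ++ [' ', c]).isEmpty) = true := by cases out <;> simp
        rw [h2]
        simp
      · simp only [hp, if_false, Bool.false_eq_true]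
        rw [ih]
        have h2 : (!(out ++ [c]).isEmpty) = true := by cases out <;> simp
        rw [h2]
        simp

theorem pvSpanRun_append : ∀ cs : List Char, (pvSpanRun cs).1 ++ (pvSpanRun cs).2 = cs := by
  intro cs
  induction cs with
  | nil => simp [pvSpanRun]
  | cons c rest ih =>
    simp only [pvSpanRun]
    split
    · simp
    · simpa using ih

theorem pvSpanRun_fst_nonws : ∀ cs : List Char, ∀ c ∈ (pvSpanRun cs).1, PySem.Chars.isspace c = false := by
  intro cs
  induction cs with
  | nil => simp [pvSpanRun]
  | cons c rest ih =>
    simp only [pvSpanRun]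
    split
    · simp
    · next h =>
      intro x hx
      simp only [List.mem_cons] at hx
      rcases hx with rfl | hx
      · exact Bool.eq_false_iff.mpr h
      · exact ih x hx

theorem pvSpanRun_snd_head : ∀ cs : List Char,
    (pvSpanRun cs).2 = [] ∨ ∃ w r, (pvSpanRun cs).2 = w :: r ∧ PySem.Chars.isspace w = true := by
  intro cs
  induction cs with
  | nil => simp [pvSpanRun]
  | cons c rest ih =>
    simp only [pvSpanRun]
    split
    · next h => exact Or.inr ⟨c, rest, rfl, h⟩
    · simpa using ih

-- pvE walks through a non-whitespace run character by character
theorem pvE_run : ∀ (run rest : List Char) (i : Int),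
    (∀ c ∈ run, PySem.Chars.isspace c = false) →
    pvE (run ++ rest) i false true =
      (run ++ (pvE rest (i + run.length) false true).1,
       pvIdxs i run.length ++ (pvE rest (i + run.length) false true).2) := by
  intro run
  induction run with
  | nil => intro rest i _; simp [pvIdxs]
  | cons c tl ih =>
    intro rest i hn
    have hc : PySem.Chars.isspace c = false := hn c (List.mem_cons_self ..)
    simp only [List.cons_append, pvE, hc, Bool.false_eq_true, if_false]
    rw [ih rest (i + 1) (fun x hx => hn x (List.mem_cons_of_mem _ hx))]
    have h2 : i + ((tl.length + 1 : Nat) : Int) = i + 1 + tl.length := by push_cast; ring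
    simp only [List.length_cons, pvIdxs, List.cons_append, h2]

-- master: pvGoB agrees with pvE in the three reachable states
theorem pvGoB_eq_pvE : ∀ (n : Nat) (cs : List Char), cs.length ≤ n → ∀ i : Int,
    pvGoB cs i true = pvE cs i false false ∧
    pvGoB cs i false = pvE cs i true true ∧
    ((cs = [] ∨ ∃ w r, cs = w :: r ∧ PySem.Chars.isspace w = true) →
      pvE cs i false true = pvGoB cs i false) := by
  intro n
  induction n with
  | zero =>
    intro cs hlen i
    have : cs = [] := List.eq_nil_of_length_eq_zero (Nat.le_zero.mp hlen)
    subst this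
    simp [pvGoB, pvE]
  | succ n ih =>
    intro cs hlen i
    cases cs with
    | nil => simp [pvGoB, pvE]
    | cons c rest =>
      have hr : rest.length ≤ n := by simpa using Nat.succ_le_succ_iff.mp hlen
      by_cases hws : PySem.Chars.isspace c
      · refine ⟨?_, ?_, ?_⟩
        · simp only [pvGoB, pvE, hws, if_true, Bool.false_or]
          exact (ih rest hr (i + 1)).1
        · simp only [pvGoB, pvE, hws, if_true, Bool.true_or]
          exact ((ih rest hr (i + 1)).2.1).symm ▸ rfl
        · intro _
          simp only [pvE, pvGoB, hws, if_true, Bool.false_or]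
          exact ((ih rest hr (i + 1)).2.1).symm
      · -- non-whitespace head: peel the whole run on both sides
        have hsplit := pvSpanRun_append rest
        have hnws := pvSpanRun_fst_nonws rest
        have hlen2 : (pvSpanRun rest).2.length ≤ n :=
          le_trans (pvSpanRun_snd_length_le rest) hr
        have hhead := pvSpanRun_snd_head rest
        have hmid : pvE (pvSpanRun rest).2 (i + 1 + (pvSpanRun rest).1.length) false true =
            pvGoB (pvSpanRun rest).2 (i + 1 + (pvSpanRun rest).1.length) false :=
          (ih _ hlen2 _).2.2 hhead
        have hrun : pvE rest (i + 1) false true =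
            ((pvSpanRun rest).1 ++ (pvGoB (pvSpanRun rest).2 (i + 1 + (pvSpanRun rest).1.length) false).1,
             pvIdxs (i + 1) (pvSpanRun rest).1.length ++
               (pvGoB (pvSpanRun rest).2 (i + 1 + (pvSpanRun rest).1.length) false).2) := by
          conv_lhs => rw [← hsplit]
          rw [pvE_run _ _ _ hnws, hmid]
        have h2 : i + (((pvSpanRun rest).1.length : Int) + 1) = i + 1 + (pvSpanRun rest).1.length := by ring
        refine ⟨?_, ?_, ?_⟩
        · simp only [pvGoB, pvE, hws, Bool.false_eq_true, if_false, if_true, List.length_cons,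
            pvIdxs, List.cons_append, Nat.cast_add, Nat.cast_one, h2]
          rw [hrun]
        · simp only [pvGoB, pvE, hws, Bool.false_eq_true, if_false, List.length_cons,
            pvIdxs, List.cons_append, Nat.cast_add, Nat.cast_one, h2]
          rw [hrun]
          simp
        · intro h
          rcases h with h | ⟨w, r, h, hw⟩
          · cases h
          · injection h with h1 _
            subst h1
            rw [hw] at hws
            exact absurd rfl hws

-- ===== VERDICT (by name: the statement is the Claim_ definition above) =====
theorem collapse_ws_with_map_py_spec : Claim_equal_collapse_ws_with_map_py := by
  intro text _
  unfold Spec_collapse_ws_with_map_py collapse_ws_with_map_py collapse_ws_with_map_py_alt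
  rw [pvGoA_eq_pvE, (pvGoB_eq_pvE text.toList.length text.toList le_rfl 0).1]
  simp
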